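-- pv_equiv track=rewrite | github.com/ZTaylor39/wordFinder | main.py | getNumWordsOnRack
-- ===== SOURCE A (Python) =====
-- import math
--
-- BLANK_INDICATOR = " "
--
-- def extractAlphaFromRegex(boardRegex: str):
--     output = ""
--     for index, char in enumerate(boardRegex):
--         if char.isalpha() and (index == 0 or boardRegex[index-1] != "\\"):
--             output += char
--     return output
--
-- def getNumWordsOnRack(rack: str, boardRegex = "", mode = "wwf"):
--     numBlanks = rack.count(BLANK_INDICATOR)
--     numAlpha = len(rack+ extractAlphaFromRegex(boardRegex)) - numBlanks
--
--     total = 0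
--     for i in range(1, numAlpha+1):
--         for j in range(0, numBlanks+1):
--             total += 26**j * math.factorial(i+j) * math.comb(numAlpha, i) * math.comb(numBlanks, j)
--
--     return total
-- ===== SOURCE B (Python) =====
-- BLANK_INDICATOR = " "
--
--
-- def getNumWordsOnRack(rack: str, boardRegex="", mode="wwf"):
--     numBlanks = rack.count(BLANK_INDICATOR)
--     alphaCount = sum(1 for k, c in enumerate(boardRegex)
--                      if c.isalpha() and (k == 0 or boardRegex[k - 1] != "\\"))
--     numAlpha = len(rack) + alphaCount - numBlanks
--
--     # Insertion DP: c[k] = weighted number of ordered arrangements of length k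
--     # built from the tiles processed so far (a blank counts 26-fold).  Adding a
--     # tile of weight w: it is either unused, or inserted into one of the k slots
--     # of a length-(k-1) arrangement.
--     def push(c, w):
--         cur = c + [0]
--         prev = [0] + c
--         return [cur[k] + w * k * prev[k] for k in range(len(cur))]
--
--     c = [1]
--     for _ in range(numBlanks):
--         c = push(c, 26)
--     blanksOnly = sum(c)          # arrangements that use no letter at all
--     for _ in range(numAlpha):
--         c = push(c, 1)
--     return sum(c) - blanksOnly
-- ===== Notes on version B (the rewrite author's own statement) =====
-- stated objective: alternative
-- what changed: B replaces the double sum of closed-form terms (powers of 26, factorials, binomials) by an incremental insertion DP over the tiles: a length-indexed array of weighted arrangement counts, updated once per tile, the answer being the final array sum minus the blanks-only sum.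
import Mathlib
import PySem

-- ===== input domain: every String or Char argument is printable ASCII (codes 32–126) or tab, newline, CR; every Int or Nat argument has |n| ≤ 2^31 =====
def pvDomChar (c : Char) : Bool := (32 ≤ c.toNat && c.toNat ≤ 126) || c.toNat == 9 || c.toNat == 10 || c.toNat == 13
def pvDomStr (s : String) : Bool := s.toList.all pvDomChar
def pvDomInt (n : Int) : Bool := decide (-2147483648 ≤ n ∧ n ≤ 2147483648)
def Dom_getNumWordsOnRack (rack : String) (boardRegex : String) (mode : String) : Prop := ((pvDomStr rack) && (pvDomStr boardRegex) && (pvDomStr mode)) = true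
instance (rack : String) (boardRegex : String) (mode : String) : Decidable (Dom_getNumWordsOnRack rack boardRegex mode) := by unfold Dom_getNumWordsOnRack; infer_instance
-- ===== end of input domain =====

-- B replaces A's double sum of closed-form terms (powers, factorials, binomials) by an
-- incremental insertion DP over the tiles: a length-indexed array of weighted arrangement
-- counts, updated once per tile; the answer is the final sum minus the blanks-only sum.

-- ===== PORT A =====
def extractAlphaFromRegex (boardRegex : String) : String :=
  String.ofList ((PySem.List.enumerate boardRegex.toList 0).foldl
    (fun output (p : Int × Char) =>
      if PySem.Chars.isalpha p.2 && (p.1 == 0 || (PySem.Str.pyGet? boardRegex (p.1 - 1) != some '\\'))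
      then output ++ [p.2] else output) [])

def getNumWordsOnRack (rack : String) (boardRegex : String) (mode : String) : Int :=
  let numBlanks : Int := (PySem.Str.count rack " " : Int)
  let numAlpha : Int := ((rack.toList ++ (extractAlphaFromRegex boardRegex).toList).length : Int) - numBlanks
  (PySem.List.pyRange 1 (numAlpha + 1) 1).foldl (fun total i =>
    (PySem.List.pyRange 0 (numBlanks + 1) 1).foldl (fun total j =>
      total + 26 ^ j.toNat * (Nat.factorial (i + j).toNat : Int)
            * (Nat.choose numAlpha.toNat i.toNat : Int)
            * (Nat.choose numBlanks.toNat j.toNat : Int)) total) 0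

-- ===== PORT B =====
-- sum(1 for k, c in enumerate(boardRegex) if c.isalpha() and (k == 0 or boardRegex[k-1] != "\\"))
def pvAlphaCount (boardRegex : String) : Int :=
  ((PySem.List.enumerate boardRegex.toList 0).countP
    (fun p => PySem.Chars.isalpha p.2 && (p.1 == 0 || (PySem.Str.pyGet? boardRegex (p.1 - 1) != some '\\'))) : Int)

-- def push(c, w): cur = c+[0]; prev = [0]+c; return [cur[k] + w*k*prev[k] for k in range(len(cur))]
def pvPush (w : Int) (c : List Int) : List Int :=
  let cur := c ++ [0]
  let prev := 0 :: c
  (List.range cur.length).map (fun (k : Nat) => cur.getD k 0 + w * (k : Int) * prev.getD k 0)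

def getNumWordsOnRack_alt (rack : String) (boardRegex : String) (mode : String) : Int :=
  let numBlanks : Int := (PySem.Str.count rack " " : Int)
  let numAlpha : Int := (rack.toList.length : Int) + pvAlphaCount boardRegex - numBlanks
  let c := (PySem.List.pyRange 0 numBlanks 1).foldl (fun c _ => pvPush 26 c) [1]
  let blanksOnly := c.sum
  let c2 := (PySem.List.pyRange 0 numAlpha 1).foldl (fun c _ => pvPush 1 c) c
  c2.sum - blanksOnly

-- ===== PRECONDITION & SPEC =====
def Spec_getNumWordsOnRack (rack : String) (boardRegex : String) (mode : String) (out : Int) : Prop := out = getNumWordsOnRack_alt rack boardRegex mode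
instance (rack : String) (boardRegex : String) (mode : String) (out : Int) : Decidable (Spec_getNumWordsOnRack rack boardRegex mode out) := by unfold Spec_getNumWordsOnRack; infer_instance

-- ===== CLAIM (what is proved, stated in full; the proofs are below) =====
def Claim_equal_getNumWordsOnRack : Prop := ∀ (rack : String) (boardRegex : String) (mode : String), Dom_getNumWordsOnRack rack boardRegex mode → Spec_getNumWordsOnRack rack boardRegex mode (getNumWordsOnRack rack boardRegex mode)

-- ===== LEMMAS AND PROOFS =====

-- the length of A's extracted string is B's count of matching positions
lemma pv_extract_len (br : String) :
    ((extractAlphaFromRegex br).toList.length : Int) = pvAlphaCount br := by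
  unfold extractAlphaFromRegex pvAlphaCount
  rw [PySem.List.foldl_append_if]
  simp [List.countP_eq_length_filter]

-- a map-sum over List.range is a Finset.range sum
lemma pv_sum_list (n : Nat) (f : Nat → Int) :
    ((List.range n).map f).sum = ∑ k ∈ Finset.range n, f k := by
  induction n with
  | zero => simp
  | succ m ih => rw [List.range_succ]; simp [Finset.sum_range_succ, ih]

-- a '+'-accumulating loop over range(0, n+1) is a Finset.range sum
lemma pv_sum0 (n : Nat) (g : Int → Int) (init : Int) :
    (PySem.List.pyRange 0 ((n : Int) + 1) 1).foldl (fun s i => s + g i) init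
    = init + ∑ k ∈ Finset.range (n + 1), g (k : Int) := by
  rw [PySem.List.foldl_add, PySem.List.pyRange_one, List.map_map]
  have h : ((n : Int) + 1 - 0).toNat = n + 1 := by omega
  rw [h, pv_sum_list]
  simp [Function.comp]

-- a '+'-accumulating loop over range(1, n+1) is a Finset.range sum shifted by one
lemma pv_sum1 (n : Nat) (g : Int → Int) (init : Int) :
    (PySem.List.pyRange 1 ((n : Int) + 1) 1).foldl (fun s i => s + g i) init
    = init + ∑ k ∈ Finset.range n, g ((k : Int) + 1) := by
  rw [PySem.List.foldl_add, PySem.List.pyRange_one, List.map_map]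
  have h : ((n : Int) + 1 - 1).toNat = n := by omega
  rw [h, pv_sum_list]
  simp [Function.comp, add_comm]

-- A's double loop as a double Finset sum
lemma pv_A_sum (A B : Nat) :
    (PySem.List.pyRange 1 ((A : Int) + 1) 1).foldl (fun total i =>
      (PySem.List.pyRange 0 ((B : Int) + 1) 1).foldl (fun total j =>
        total + 26 ^ j.toNat * (Nat.factorial (i + j).toNat : Int)
              * (Nat.choose (A : Int).toNat i.toNat : Int)
              * (Nat.choose (B : Int).toNat j.toNat : Int)) total) 0
    = ∑ i ∈ Finset.range A, ∑ j ∈ Finset.range (B + 1),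
        (26 : Int) ^ j * (Nat.factorial (i + 1 + j) : Int)
          * (Nat.choose A (i + 1) : Int) * (Nat.choose B j : Int) := by
  have hfun : (fun (total : Int) (i : Int) =>
      (PySem.List.pyRange 0 ((B : Int) + 1) 1).foldl (fun total j =>
        total + 26 ^ j.toNat * (Nat.factorial (i + j).toNat : Int)
              * (Nat.choose (A : Int).toNat i.toNat : Int)
              * (Nat.choose (B : Int).toNat j.toNat : Int)) total)
      = (fun (total : Int) (i : Int) =>
        total + ∑ j ∈ Finset.range (B + 1),
          26 ^ ((j : Int)).toNat * (Nat.factorial (i + (j : Int)).toNat : Int)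
              * (Nat.choose (A : Int).toNat i.toNat : Int)
              * (Nat.choose (B : Int).toNat ((j : Int)).toNat : Int)) := by
    funext total i
    rw [pv_sum0]
  rw [hfun, pv_sum1, zero_add]
  refine Finset.sum_congr rfl (fun i _ => Finset.sum_congr rfl (fun j _ => ?_))
  have h1 : (((i : Int) + 1 + (j : Int))).toNat = i + 1 + j := by omega
  have h2 : (((i : Int) + 1)).toNat = i + 1 := by omega
  simp [h1, h2]

-- DP invariant: after a letters and b blanks, entry k of the array is
-- k! * sum_j C(b,j) C(a,k-j) 26^j  (the weighted count of length-k arrangements)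
def pvCoefN (a b k : Nat) : Nat :=
  ∑ j ∈ Finset.range (b + 1),
    if j ≤ k then Nat.choose b j * Nat.choose a (k - j) * 26 ^ j * Nat.factorial k else 0

def pvLL (a b : Nat) : List Int := (List.range (a + b + 1)).map (fun k => (pvCoefN a b k : Int))

lemma pv_coef_zero (a b : Nat) : pvCoefN a b 0 = 1 := by
  unfold pvCoefN
  rw [Finset.sum_eq_single 0]
  · simp
  · intro j _ hj
    rw [if_neg (by omega)]
  · simp

lemma pv_coef_gt (a b k : Nat) (h : a + b < k) : pvCoefN a b k = 0 := by
  unfold pvCoefN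
  refine Finset.sum_eq_zero (fun j hj => ?_)
  rw [Finset.mem_range] at hj
  split_ifs with hjk
  · rw [Nat.choose_eq_zero_of_lt (show a < k - j by omega)]; ring
  · rfl

-- Pascal step for adding one letter (weight 1)
lemma pv_coef_letter (a b k : Nat) :
    pvCoefN (a + 1) b (k + 1) = pvCoefN a b (k + 1) + (k + 1) * pvCoefN a b k := by
  unfold pvCoefN
  rw [Finset.mul_sum, ← Finset.sum_add_distrib]
  refine Finset.sum_congr rfl (fun j hj => ?_)
  by_cases hjk : j ≤ k
  · have h1 : j ≤ k + 1 := by omega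
    have h2 : k + 1 - j = (k - j) + 1 := by omega
    simp only [h1, hjk, if_pos]
    rw [h2, Nat.choose_succ_succ]
    rw [Nat.factorial_succ]
    ring
  · by_cases hjk1 : j ≤ k + 1
    · -- j = k + 1
      have hj1 : j = k + 1 := by omega
      subst hj1
      simp only [if_pos le_rfl, if_neg hjk]
      simp [Nat.sub_self]
    · simp [hjk1, hjk]

-- Pascal step for adding one blank (weight 26)
lemma pv_coef_blank (a b k : Nat) :
    pvCoefN a (b + 1) (k + 1) = pvCoefN a b (k + 1) + 26 * (k + 1) * pvCoefN a b k := by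
  unfold pvCoefN
  have hsplit : ∀ j ∈ Finset.range (b + 2),
      (if j ≤ k + 1 then Nat.choose (b + 1) j * Nat.choose a (k + 1 - j) * 26 ^ j * Nat.factorial (k + 1) else 0)
      = (if j ≤ k + 1 then Nat.choose b j * Nat.choose a (k + 1 - j) * 26 ^ j * Nat.factorial (k + 1) else 0)
        + (if j ≤ k + 1 then (if j = 0 then 0 else Nat.choose b (j - 1) * Nat.choose a (k + 1 - j) * 26 ^ j * Nat.factorial (k + 1)) else 0) := by
    intro j _
    split_ifs with hjk hj0
    · subst hj0; simp
    · obtain ⟨t, rfl⟩ : ∃ t, j = t + 1 := ⟨j - 1, by omega⟩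
      rw [Nat.choose_succ_succ]
      simp only [Nat.add_sub_cancel]
      ring
    · rfl
  rw [Finset.sum_congr rfl hsplit, Finset.sum_add_distrib]
  congr 1
  · -- the C(b,·) part: the extra j = b+1 term vanishes
    rw [show b + 2 = (b + 1) + 1 by rfl, Finset.sum_range_succ]
    rw [Nat.choose_succ_self]
    simp
  · -- the shifted part: reindex j = t+1
    rw [show b + 2 = (b + 1) + 1 from rfl, Finset.sum_range_succ', Finset.mul_sum]
    have hz : (if (0:Nat) ≤ k + 1 then (if (0:Nat) = 0 then (0:Nat) else Nat.choose b (0 - 1) * Nat.choose a (k + 1 - 0) * 26 ^ (0:Nat) * Nat.factorial (k + 1)) else 0) = 0 := by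
      simp
    rw [hz, add_zero]
    refine Finset.sum_congr rfl (fun t _ => ?_)
    have e2 : k + 1 - (t + 1) = k - t := by omega
    by_cases htk : t ≤ k
    · rw [if_pos (show t + 1 ≤ k + 1 by omega), if_neg (show ¬ (t + 1 = 0) by omega), if_pos htk]
      simp only [Nat.add_sub_cancel, e2]
      rw [Nat.factorial_succ, pow_succ]
      ring
    · rw [if_neg (show ¬ (t + 1 ≤ k + 1) by omega), if_neg htk]
      ring

-- getD facts used to read the comprehension
lemma pv_getD_range_map (f : Nat → Int) (n k : Nat) :
    ((List.range n).map f).getD k 0 = if k < n then f k else 0 := by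
  by_cases h : k < n
  · rw [List.getD_eq_getElem?_getD]
    simp [List.getElem?_map, List.getElem?_range, h]
  · rw [List.getD_eq_default _ _ (by simpa using by omega)]
    simp [h]

lemma pv_getD_append_zero (l : List Int) (k : Nat) :
    (l ++ [(0:Int)]).getD k 0 = l.getD k 0 := by
  by_cases h : k < l.length
  · rw [List.getD_eq_getElem?_getD, List.getD_eq_getElem?_getD, List.getElem?_append_left h]
  · rw [List.getD_eq_getElem?_getD, List.getD_eq_getElem?_getD]
    by_cases h2 : k = l.length
    · subst h2
      simp
    · rw [List.getElem?_eq_none (by simp; omega), List.getElem?_eq_none (by omega)]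

-- one push step on the invariant list
lemma pv_push_step (w : Int) (a b a' b' : Nat)
    (hlen : a' + b' = a + b + 1)
    (h0 : pvCoefN a' b' 0 = 1)
    (hrec : ∀ k, (pvCoefN a' b' (k + 1) : Int) = pvCoefN a b (k + 1) + w * (k + 1) * pvCoefN a b k) :
    pvPush w (pvLL a b) = pvLL a' b' := by
  unfold pvPush pvLL
  simp only [List.length_append, List.length_map, List.length_range, List.length_cons,
    List.length_nil]
  rw [show a + b + 1 + (0 + 1) = a' + b' + 1 by omega]
  refine List.map_congr_left (fun k hk => ?_)
  rw [List.mem_range] at hk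
  rw [pv_getD_append_zero, pv_getD_range_map]
  cases k with
  | zero =>
      rw [if_pos (show 0 < a + b + 1 by omega), pv_coef_zero, h0]
      simp
  | succ m =>
      have hprev : ((0 : Int) :: (List.range (a + b + 1)).map (fun k => (pvCoefN a b k : Int))).getD (m + 1) 0
          = ((List.range (a + b + 1)).map (fun k => (pvCoefN a b k : Int))).getD m 0 := rfl
      rw [hprev, pv_getD_range_map]
      have hm : m < a + b + 1 := by omega
      rw [if_pos hm]
      by_cases hm1 : m + 1 < a + b + 1
      · rw [if_pos hm1]
        push_cast [hrec m]
        ring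
      · rw [if_neg hm1]
        have hz : pvCoefN a b (m + 1) = 0 := pv_coef_gt a b (m + 1) (by omega)
        have h2 := hrec m
        rw [hz] at h2
        push_cast at h2 ⊢
        all_goals linarith [h2]

lemma pv_push_letter (a b : Nat) : pvPush 1 (pvLL a b) = pvLL (a + 1) b :=
  pv_push_step 1 a b (a + 1) b (by omega) (pv_coef_zero _ _)
    (fun k => by rw [pv_coef_letter]; push_cast; ring)

lemma pv_push_blank (a b : Nat) : pvPush 26 (pvLL a b) = pvLL a (b + 1) :=
  pv_push_step 26 a b a (b + 1) (by omega) (pv_coef_zero _ _)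
    (fun k => by rw [pv_coef_blank]; push_cast; ring)

-- a fold that ignores the list elements is an iterate
lemma pv_foldl_ignore {α β : Type} (F : α → α) (l : List β) (init : α) :
    l.foldl (fun c _ => F c) init = F^[l.length] init := by
  induction l generalizing init with
  | nil => rfl
  | cons x xs ih => simp [ih, Function.iterate_succ_apply]

lemma pv_LL_zero : pvLL 0 0 = [(1 : Int)] := by
  unfold pvLL
  simp [pv_coef_zero]

lemma pv_iter_blank (b : Nat) : (pvPush 26)^[b] [(1 : Int)] = pvLL 0 b := by
  induction b with
  | zero => exact pv_LL_zero.symm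
  | succ m ih => rw [Function.iterate_succ_apply', ih, pv_push_blank]

lemma pv_iter_letter (a b : Nat) : (pvPush 1)^[a] (pvLL 0 b) = pvLL a b := by
  induction a with
  | zero => rfl
  | succ m ih => rw [Function.iterate_succ_apply', ih, pv_push_letter]

-- shifting a guarded range sum
lemma pv_sum_shift (j : Nat) (g : Nat → Int) :
    ∀ n, j ≤ n → (∑ k ∈ Finset.range n, if j ≤ k then g (k - j) else 0) = ∑ i ∈ Finset.range (n - j), g i := by
  intro n
  induction n with
  | zero =>
      intro h
      simp
  | succ m ih =>
      intro h
      by_cases hjm : j ≤ m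
      · rw [Finset.sum_range_succ, ih hjm, if_pos hjm,
          show m + 1 - j = (m - j) + 1 by omega, Finset.sum_range_succ]
      · have hj : j = m + 1 := by omega
        subst hj
        rw [show m + 1 - (m + 1) = 0 by omega]
        simp only [Finset.range_zero, Finset.sum_empty]
        refine Finset.sum_eq_zero (fun k hk => ?_)
        rw [Finset.mem_range] at hk
        rw [if_neg (by omega)]

-- the sum of the DP array in closed form
lemma pv_sum_LL (a b : Nat) :
    (pvLL a b).sum = ∑ j ∈ Finset.range (b + 1), ∑ i ∈ Finset.range (a + 1),
      ((Nat.choose b j * Nat.choose a i * 26 ^ j * Nat.factorial (i + j) : Nat) : Int) := by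
  unfold pvLL
  rw [pv_sum_list]
  have hcast : ∀ k, ((pvCoefN a b k : Nat) : Int)
      = ∑ j ∈ Finset.range (b + 1), if j ≤ k then ((Nat.choose b j * Nat.choose a (k - j) * 26 ^ j * Nat.factorial k : Nat) : Int) else 0 := by
    intro k
    unfold pvCoefN
    push_cast [apply_ite (fun (x : Nat) => (x : Int))]
    rfl
  rw [Finset.sum_congr rfl (fun k _ => hcast k), Finset.sum_comm]
  refine Finset.sum_congr rfl (fun j hj => ?_)
  rw [Finset.mem_range] at hj
  have hstep : (∑ k ∈ Finset.range (a + b + 1), if j ≤ k then ((Nat.choose b j * Nat.choose a (k - j) * 26 ^ j * Nat.factorial k : Nat) : Int) else 0)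
      = ∑ i ∈ Finset.range (a + b + 1 - j), ((Nat.choose b j * Nat.choose a i * 26 ^ j * Nat.factorial (i + j) : Nat) : Int) := by
    rw [← pv_sum_shift j (fun i => ((Nat.choose b j * Nat.choose a i * 26 ^ j * Nat.factorial (i + j) : Nat) : Int)) (a + b + 1) (show j ≤ a + b + 1 by omega)]
    refine Finset.sum_congr rfl (fun k _ => ?_)
    split_ifs with hjk
    · rw [show k - j + j = k by omega]
    · rfl
  rw [hstep]
  refine (Finset.sum_subset (s₁ := Finset.range (a + 1)) (s₂ := Finset.range (a + b + 1 - j)) (fun x hx => Finset.mem_range.mpr (by have hx' := Finset.mem_range.mp hx; omega)) (fun i hi hni => ?_)).symm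
  rw [Finset.mem_range] at hi hni
  rw [Nat.choose_eq_zero_of_lt (show a < i by omega)]
  push_cast
  ring

-- the final combinatorial identity: A's double sum = full DP sum minus blanks-only sum
lemma pv_final (A B : Nat) :
    (∑ i ∈ Finset.range A, ∑ j ∈ Finset.range (B + 1),
        (26 : Int) ^ j * (Nat.factorial (i + 1 + j) : Int)
          * (Nat.choose A (i + 1) : Int) * (Nat.choose B j : Int))
    = (pvLL A B).sum - (pvLL 0 B).sum := by
  rw [pv_sum_LL, pv_sum_LL, ← Finset.sum_sub_distrib, Finset.sum_comm]
  refine Finset.sum_congr rfl (fun j _ => ?_)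
  rw [Finset.sum_range_succ', Finset.sum_range_one]
  have h0 : ((Nat.choose B j * Nat.choose A 0 * 26 ^ j * Nat.factorial (0 + j) : Nat) : Int)
      = ((Nat.choose B j * Nat.choose 0 0 * 26 ^ j * Nat.factorial (0 + j) : Nat) : Int) := by
    norm_num
  rw [h0]
  rw [add_sub_assoc, sub_self, add_zero]
  refine Finset.sum_congr rfl (fun i _ => ?_)
  push_cast
  ring

-- ===== VERDICT (by name: the statement is the Claim_ definition above) =====
theorem getNumWordsOnRack_spec : Claim_equal_getNumWordsOnRack := by
  intro rack br mode _
  unfold Spec_getNumWordsOnRack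
  simp only [getNumWordsOnRack, getNumWordsOnRack_alt]
  have hlen : ((rack.toList ++ (extractAlphaFromRegex br).toList).length : Int)
        - (PySem.Str.count rack " " : Int)
      = (rack.toList.length : Int) + pvAlphaCount br - (PySem.Str.count rack " " : Int) := by
    rw [List.length_append]
    push_cast
    rw [pv_extract_len]
  rw [hlen]
  set na : Int := (rack.toList.length : Int) + pvAlphaCount br - (PySem.Str.count rack " " : Int) with hna
  set nb : Nat := PySem.Str.count rack " " with hnb
  have hc : (PySem.List.pyRange 0 (nb : Int) 1).foldl (fun c _ => pvPush 26 c) [1] = pvLL 0 nb := by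
    rw [pv_foldl_ignore, PySem.List.length_pyRange_one,
      show ((nb : Int) - 0).toNat = nb by omega, pv_iter_blank]
  rcases Int.lt_or_le na 0 with hneg | hpos
  · have hnil : PySem.List.pyRange 1 (na + 1) 1 = [] :=
      PySem.List.pyRange_one_eq_nil (by omega)
    have hnil2 : PySem.List.pyRange 0 na 1 = [] :=
      PySem.List.pyRange_one_eq_nil (by omega)
    rw [hnil, hnil2]
    simp
  · obtain ⟨A, hA⟩ : ∃ A : Nat, na = (A : Int) := ⟨na.toNat, (Int.toNat_of_nonneg hpos).symm⟩
    rw [hA, pv_A_sum A nb, hc]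
    have hc2 : (PySem.List.pyRange 0 ((A : Int)) 1).foldl (fun c _ => pvPush 1 c) (pvLL 0 nb) = pvLL A nb := by
      rw [pv_foldl_ignore, PySem.List.length_pyRange_one,
        show ((A : Int) - 0).toNat = A by omega, pv_iter_letter]
    rw [hc2, pv_final A nb]
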